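-- pv_equiv track=rewrite | github.com/LuisMoncayo/Quantum_Opt_Supply_Chain | LB_Slack.py | slack_binary
-- ===== SOURCE A (Python) =====
-- def slack_binary(upper_bound):
--     u = upper_bound#upper bound
--     lst = []# = 2^{k+1}-1 -------
--     k = 0
--     while True:
--         val = 2**(k+1) - 1
--         lst.append(val)
--         if val >= u:
--             break
--         k += 1
--     return [2**i for i in range(len(lst))]
-- ===== SOURCE B (Python) =====
-- def slack_binary(upper_bound):
--     n = upper_bound.bit_length() if upper_bound > 0 else 1
--     return [2 ** i for i in range(n)]
-- ===== Notes on version B (the rewrite author's own statement) =====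
-- stated objective: simpler
-- what changed: Replaced the while-loop that builds and discards an intermediate list with a closed-form length: n = bit_length(upper_bound) for positive input (smallest m>=1 with 2^m-1 >= upper_bound), else 1.
import Mathlib
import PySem

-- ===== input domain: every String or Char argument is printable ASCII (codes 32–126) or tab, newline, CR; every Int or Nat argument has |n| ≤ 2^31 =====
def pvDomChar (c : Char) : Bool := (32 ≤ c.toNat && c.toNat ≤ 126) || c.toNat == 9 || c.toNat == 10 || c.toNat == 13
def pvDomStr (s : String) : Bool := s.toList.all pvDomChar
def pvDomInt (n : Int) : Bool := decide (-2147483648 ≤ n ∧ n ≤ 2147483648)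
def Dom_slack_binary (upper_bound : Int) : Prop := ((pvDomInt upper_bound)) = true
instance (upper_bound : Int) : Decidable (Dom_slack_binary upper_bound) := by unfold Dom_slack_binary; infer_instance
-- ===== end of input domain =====

-- B replaces A's while-loop (which builds and discards an intermediate list) by a
-- closed-form length computed with bit_length; same return value, simpler.

-- ===== PORT A =====
-- the while-loop of A: appends 2^(k+1)-1 to lst each round, stops once val ≥ u
def slackLoopA (u : Int) (k : Nat) (lst : List Int) : List Int :=
  let val : Int := 2 ^ (k + 1) - 1
  let lst' := lst ++ [val]
  if val ≥ u then lst' else slackLoopA u (k + 1) lst'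
termination_by (u - (2 ^ (k + 1) - 1)).toNat
decreasing_by
  have h1 : (2:Int) ^ (k + 1) < 2 ^ (k + 1 + 1) := by
    have := pow_lt_pow_right₀ (a := (2:Int)) (by norm_num) (Nat.lt_succ_self (k+1))
    simpa using this
  simp only [not_le] at *
  omega

def slack_binary (upper_bound : Int) : List Int :=
  let lst := slackLoopA upper_bound 0 []
  (List.range lst.length).map (fun i => (2:Int) ^ i)

-- ===== PORT B =====
def slack_binary_alt (upper_bound : Int) : List Int :=
  let n : Nat := if 0 < upper_bound then upper_bound.toNat.size else 1
  (List.range n).map (fun i => (2:Int) ^ i)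

-- ===== PRECONDITION & SPEC =====
def Spec_slack_binary (upper_bound : Int) (out : List Int) : Prop := out = slack_binary_alt upper_bound
instance (upper_bound : Int) (out : List Int) : Decidable (Spec_slack_binary upper_bound out) := by unfold Spec_slack_binary; infer_instance

-- ===== CLAIM (what is proved, stated in full; the proofs are below) =====
def Claim_equal_slack_binary : Prop := ∀ (upper_bound : Int), Dom_slack_binary upper_bound → Spec_slack_binary upper_bound (slack_binary upper_bound)

-- ===== LEMMAS AND PROOFS =====

-- the closed-form length B computes
def slackN (u : Int) : Nat := if 0 < u then u.toNat.size else 1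

lemma slackN_pos (u : Int) : 1 ≤ slackN u := by
  unfold slackN
  split_ifs with h
  · have : u.toNat ≠ 0 := by omega
    exact Nat.size_pos.mpr (Nat.pos_of_ne_zero this)
  · exact le_refl 1

-- the loop's stopping condition is exactly "k+1 ≥ slackN u"
lemma slack_cond (u : Int) (k : Nat) : ((2:Int) ^ (k + 1) - 1 ≥ u) ↔ slackN u ≤ k + 1 := by
  unfold slackN
  split_ifs with h
  · have hcast : ((u.toNat : Int)) = u := Int.toNat_of_nonneg (by omega)
    constructor
    · intro hge
      apply Nat.size_le.mpr
      have : (u.toNat : Int) < (2:Int) ^ (k + 1) := by omega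
      have := this
      rw [show ((2:Int) ^ (k+1)) = ((2 ^ (k+1) : Nat) : Int) by push_cast; ring] at this
      exact_mod_cast this
    · intro hle
      have := Nat.size_le.mp hle
      have : (u.toNat : Int) < ((2 ^ (k+1) : Nat) : Int) := by exact_mod_cast this
      rw [hcast] at this
      push_cast at this
      omega
  · constructor
    · intro _; exact Nat.one_le_iff_ne_zero.mpr (Nat.succ_ne_zero k)
    · intro _
      have : (0:Int) < 2 ^ (k+1) := by positivity
      omega

-- length of the loop result: adds (slackN u - k) elements when k < slackN u
lemma slackLoopA_length (u : Int) : ∀ (m k : Nat) (lst : List Int),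
    slackN u - k = m + 1 →
    (slackLoopA u k lst).length = lst.length + (m + 1) := by
  intro m
  induction m with
  | zero =>
    intro k lst hm
    rw [slackLoopA]
    have hstop : (2:Int) ^ (k + 1) - 1 ≥ u := (slack_cond u k).mpr (by omega)
    simp [hstop]
  | succ m ih =>
    intro k lst hm
    rw [slackLoopA]
    have hns : ¬ ((2:Int) ^ (k + 1) - 1 ≥ u) := by
      intro hc
      have := (slack_cond u k).mp hc
      omega
    simp only [hns, if_false]
    have := ih (k + 1) (lst ++ [2 ^ (k + 1) - 1]) (by omega)
    simp only [List.length_append, List.length_cons, List.length_nil] at this ⊢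
    omega

lemma slack_binary_length (u : Int) : (slackLoopA u 0 []).length = slackN u := by
  have h1 := slackN_pos u
  have h2 := slackLoopA_length u (slackN u - 1) 0 [] (by omega)
  simp only [List.length_nil, Nat.zero_add] at h2
  omega

-- ===== VERDICT (by name: the statement is the Claim_ definition above) =====
theorem slack_binary_spec : Claim_equal_slack_binary := by
  intro u _
  unfold Spec_slack_binary slack_binary slack_binary_alt
  have h := slack_binary_length u
  simp only [h]
  rfl
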